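-- pv_equiv track=rewrite | github.com/tfer2442/myAlgorithm | 프로그래머스/unrated/150368. 이모티콘 할인행사/이모티콘 할인행사.py | solution
-- ===== SOURCE A (Python) =====
-- from itertools import product
--
-- def solution(users, emoticons):
--     answer = [0, 0]
--     rate = [40] * len(emoticons)
--     dcemo = [0] * len(emoticons)
--     anslist = []
--
--     for tmp in product([10, 20, 30, 40], repeat=len(emoticons)):
--         for i in range(len(tmp)):
--             dcemo[i] = int((emoticons[i] * (100-tmp[i]))//100)
--         pluscnt = 0
--         usertotal = 0
--         for i in range(len(users)):
--             total = 0
--             for j in range(len(tmp)):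
--                 if tmp[j] >= users[i][0]:
--                     total += dcemo[j]
--             if total >= users[i][1]:
--                 pluscnt += 1
--             else:
--                 usertotal += total
--         anslist.append((pluscnt, usertotal, tmp[:]))
--     anslist.sort(key = lambda x : (-x[0], -x[1]))
--     answer[0] = anslist[0][0]
--     answer[1] = anslist[0][1]
--
--     return answer
-- ===== SOURCE B (Python) =====
-- def solution(users, emoticons):
--     # Bucket-sum evaluation: a depth-first recursion over the emoticons maintains the
--     # discounted-price sum per rate (s10..s40); at each leaf every user is scored in O(1)
--     # from the four suffix sums, so the per-user inner loop over emoticons disappears.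
--     def score(t10, t20, t30, t40):
--         pluscnt = 0
--         usertotal = 0
--         for u in users:
--             a = u[0]
--             if a <= 10:
--                 spend = t10
--             elif a <= 20:
--                 spend = t20
--             elif a <= 30:
--                 spend = t30
--             elif a <= 40:
--                 spend = t40
--             else:
--                 spend = 0
--             if spend >= u[1]:
--                 pluscnt += 1
--             else:
--                 usertotal += spend
--         return (pluscnt, usertotal)
--
--     def go(rest, s10, s20, s30, s40, best):
--         if not rest:
--             t40 = s40
--             t30 = t40 + s30
--             t20 = t30 + s20
--             t10 = t20 + s10
--             cand = score(t10, t20, t30, t40)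
--             return cand if cand > best else best
--         p = rest[0]
--         rest = rest[1:]
--         best = go(rest, s10 + p * 90 // 100, s20, s30, s40, best)
--         best = go(rest, s10, s20 + p * 80 // 100, s30, s40, best)
--         best = go(rest, s10, s20, s30 + p * 70 // 100, s40, best)
--         best = go(rest, s10, s20, s30, s40 + p * 60 // 100, best)
--         return best
--
--     b = go(emoticons, 0, 0, 0, 0, (-1, -1))
--     return [b[0], b[1]]
-- ===== Notes on version B (the rewrite author's own statement) =====
-- stated objective: alternative
-- what changed: B replaces A's per-combination nested users-by-emoticons scoring and collect-all-then-sort tail with a DFS over the emoticons that maintains per-rate discounted-price bucket sums, scores each user from the four suffix sums at each leaf (no inner loop over emoticons), and keeps a running lexicographic best pair instead of sorting all results.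
import Mathlib
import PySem

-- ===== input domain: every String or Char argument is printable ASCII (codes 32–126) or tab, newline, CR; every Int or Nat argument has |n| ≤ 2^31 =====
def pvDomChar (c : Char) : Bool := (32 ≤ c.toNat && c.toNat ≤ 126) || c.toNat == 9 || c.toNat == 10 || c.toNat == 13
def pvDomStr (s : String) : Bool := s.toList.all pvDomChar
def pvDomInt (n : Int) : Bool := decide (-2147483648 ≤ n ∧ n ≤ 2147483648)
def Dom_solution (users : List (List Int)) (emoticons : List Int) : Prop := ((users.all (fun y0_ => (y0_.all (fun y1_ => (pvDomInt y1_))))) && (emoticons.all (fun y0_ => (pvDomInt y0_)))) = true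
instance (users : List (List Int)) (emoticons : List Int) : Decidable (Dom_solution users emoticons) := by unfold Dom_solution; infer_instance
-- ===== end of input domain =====

-- B replaces A's per-combination nested users×emoticons scoring and collect-then-sort tail with a
-- DFS over the emoticons maintaining per-rate discounted-price bucket sums, scoring each user from
-- the four suffix sums at each leaf and keeping a running lexicographic best (objective: alternative).


-- ===== PORT A =====
-- product([10, 20, 30, 40], repeat=n), in CPython's order (leftmost position varies slowest)
def pvCombos : Nat → List (List Int)
  | 0 => [[]]
  | n + 1 => ([10, 20, 30, 40] : List Int).flatMap (fun x => (pvCombos n).map (fun t => x :: t))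

-- Python's tuple comparison of the sort keys (-x[0], -x[1]): key(a) <= key(b)
def pvKeyLe (a b : Int × Int × List Int) : Bool :=
  decide ((-a.1 : Int) < -b.1) || (decide ((-a.1 : Int) = -b.1) && decide ((-a.2.1 : Int) ≤ -b.2.1))

-- A's per-combination evaluation, verbatim: dcemo[i] = (emoticons[i]*(100-tmp[i]))//100, then the
-- two nested user loops yielding (pluscnt, usertotal). Inside Pre_solution every users[i] has
-- length ≥ 2, so getD equals Python's indexing.
def pvEval (users : List (List Int)) (emoticons : List Int) (tmp : List Int) : Int × Int :=
  let dcemo : List Int := (List.range tmp.length).map (fun i =>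
      PySem.Int.floordiv (emoticons.getD i 0 * (100 - tmp.getD i 0)) 100)
  users.foldl (fun (acc : Int × Int) u =>
      let total : Int := (List.range tmp.length).foldl (fun (t : Int) j =>
          if u.getD 0 0 ≤ tmp.getD j 0 then t + dcemo.getD j 0 else t) 0
      if u.getD 1 0 ≤ total then (acc.1 + 1, acc.2) else (acc.1, acc.2 + total)) (0, 0)

def solution (users : List (List Int)) (emoticons : List Int) : List Int :=
  let anslist := (pvCombos emoticons.length).map (fun tmp =>
      let r := pvEval users emoticons tmp
      (r.1, r.2, tmp))
  -- anslist.sort(key=lambda x: (-x[0], -x[1])): list.sort is a stable sort; ported as the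
  -- stable library sort List.mergeSort with the same lex key comparison (the output reads only
  -- the head's (pluscnt, usertotal), which any stable sort under this comparator agrees on)
  match anslist.mergeSort pvKeyLe with
  | [] => [0, 0]      -- unreachable: pvCombos is never empty, so anslist[0] exists
  | h :: _ => [h.1, h.2.1]

-- ===== PORT B =====
-- score(t10,t20,t30,t40): one pass over users, O(1) per user from the four suffix sums
def pvScore (users : List (List Int)) (t10 t20 t30 t40 : Int) : Int × Int :=
  users.foldl (fun (acc : Int × Int) u =>
    let a := u.getD 0 0
    let spend : Int :=
      if a ≤ 10 then t10 else if a ≤ 20 then t20 else if a ≤ 30 then t30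
      else if a ≤ 40 then t40 else 0
    if u.getD 1 0 ≤ spend then (acc.1 + 1, acc.2) else (acc.1, acc.2 + spend)) (0, 0)

-- go(rest, s10, s20, s30, s40, best): DFS assigning a rate to rest[0], threading the running best
def pvGo (users : List (List Int)) : List Int → Int → Int → Int → Int → Int × Int → Int × Int
  | [], s10, s20, s30, s40, best =>
      let t40 := s40
      let t30 := t40 + s30
      let t20 := t30 + s20
      let t10 := t20 + s10
      let cand := pvScore users t10 t20 t30 t40
      if best.1 < cand.1 ∨ (best.1 = cand.1 ∧ best.2 < cand.2) then cand else best
  | p :: rest, s10, s20, s30, s40, best =>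
      let b1 := pvGo users rest (s10 + PySem.Int.floordiv (p * 90) 100) s20 s30 s40 best
      let b2 := pvGo users rest s10 (s20 + PySem.Int.floordiv (p * 80) 100) s30 s40 b1
      let b3 := pvGo users rest s10 s20 (s30 + PySem.Int.floordiv (p * 70) 100) s40 b2
      pvGo users rest s10 s20 s30 (s40 + PySem.Int.floordiv (p * 60) 100) b3

def solution_alt (users : List (List Int)) (emoticons : List Int) : List Int :=
  let b := pvGo users emoticons 0 0 0 0 (-1, -1)
  [b.1, b.2]

-- ===== PRECONDITION & SPEC =====
-- Pre_ excludes exactly the inputs where Python A raises IndexError: a user entry with fewer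
-- than two fields (users[i][0]/users[i][1] are read unconditionally).
def Pre_solution (users : List (List Int)) (emoticons : List Int) : Prop :=
  ∀ u ∈ users, 2 ≤ u.length
instance (users : List (List Int)) (emoticons : List Int) : Decidable (Pre_solution users emoticons) := by unfold Pre_solution; infer_instance

def pvWitness_solution : List (List Int) × List Int := ([[40, 100], [10, 50]], [1000, 200])

def Spec_solution (users : List (List Int)) (emoticons : List Int) (out : List Int) : Prop := out = solution_alt users emoticons
instance (users : List (List Int)) (emoticons : List Int) (out : List Int) : Decidable (Spec_solution users emoticons out) := by unfold Spec_solution; infer_instance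

-- ===== CLAIM (what is proved, stated in full; the proofs are below) =====
def Claim_equal_solution : Prop := ∀ (users : List (List Int)) (emoticons : List Int), Dom_solution users emoticons → Pre_solution users emoticons → Spec_solution users emoticons (solution users emoticons)

-- ===== LEMMAS AND PROOFS =====

-- the running-max update (Python's 'cand if cand > best else best')
def pvStep (b c : Int × Int) : Int × Int :=
  if b.1 < c.1 ∨ (b.1 = c.1 ∧ b.2 < c.2) then c else b

-- lexicographic ≤ on (pluscnt, usertotal) pairs, i.e. Python's tuple comparison
def pvLexLe (a b : Int × Int) : Prop := a.1 < b.1 ∨ (a.1 = b.1 ∧ a.2 ≤ b.2)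

theorem pvLexLe_refl (a : Int × Int) : pvLexLe a a := by
  unfold pvLexLe; omega

theorem pvLexLe_trans {a b c : Int × Int} (h1 : pvLexLe a b) (h2 : pvLexLe b c) : pvLexLe a c := by
  unfold pvLexLe at *; omega

theorem pvLexLe_antisymm {a b : Int × Int} (h1 : pvLexLe a b) (h2 : pvLexLe b a) : a = b := by
  unfold pvLexLe at *
  obtain ⟨a1, a2⟩ := a; obtain ⟨b1, b2⟩ := b
  simp only [Prod.mk.injEq]
  constructor <;> omega

-- membership witness: [10,10,…,10] ∈ pvCombos n
theorem pvCombos_mem (n : Nat) : List.replicate n (10 : Int) ∈ pvCombos n := by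
  induction n with
  | zero => simp [pvCombos]
  | succ n ih =>
      simp only [pvCombos, List.mem_flatMap, List.mem_map, List.replicate_succ]
      exact ⟨10, by simp, List.replicate n 10, ih, rfl⟩

theorem pvCombos_ne_nil (n : Nat) : pvCombos n ≠ [] :=
  List.ne_nil_of_mem (pvCombos_mem n)

theorem pvCombos_length {n : Nat} {tmp : List Int} (h : tmp ∈ pvCombos n) : tmp.length = n := by
  induction n generalizing tmp with
  | zero => simp [pvCombos] at h; simp [h]
  | succ n ih =>
      simp only [pvCombos, List.mem_flatMap, List.mem_map] at h
      obtain ⟨x, _, t, ht, rfl⟩ := h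
      simp [ih ht]

theorem pvCombos_rates {n : Nat} {tmp : List Int} (h : tmp ∈ pvCombos n) :
    ∀ r ∈ tmp, r = 10 ∨ r = 20 ∨ r = 30 ∨ r = 40 := by
  induction n generalizing tmp with
  | zero => simp [pvCombos] at h; simp [h]
  | succ n ih =>
      simp only [pvCombos, List.mem_flatMap, List.mem_map] at h
      obtain ⟨x, hx, t, ht, rfl⟩ := h
      intro r hr
      rcases List.mem_cons.mp hr with rfl | hr
      · simpa using hx
      · exact ih ht r hr

-- pluscnt is a count, hence nonnegative
theorem pvFoldl_fst_mono {α : Type} (g : Int × Int → α → Int × Int)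
    (h : ∀ a x, a.1 ≤ (g a x).1) : ∀ (l : List α) (a : Int × Int), a.1 ≤ (l.foldl g a).1 := by
  intro l
  induction l with
  | nil => intro a; simp
  | cons x t ih => intro a; exact le_trans (h a x) (ih (g a x))

theorem pvEval_fst_nonneg (users : List (List Int)) (emoticons tmp : List Int) :
    0 ≤ (pvEval users emoticons tmp).1 := by
  unfold pvEval
  refine pvFoldl_fst_mono _ ?_ users (0, 0)
  intro a u
  dsimp only
  split <;> simp

-- the running-max fold
theorem pvFoldl_max_spec {α : Type} (f : α → Int × Int) :
    ∀ (l : List α) (i : Int × Int),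
      (l.foldl (fun best tmp => pvStep best (f tmp)) i = i ∨
       ∃ t ∈ l, l.foldl (fun best tmp => pvStep best (f tmp)) i = f t) ∧
      pvLexLe i (l.foldl (fun best tmp => pvStep best (f tmp)) i) ∧
      ∀ t ∈ l, pvLexLe (f t) (l.foldl (fun best tmp => pvStep best (f tmp)) i) := by
  intro l
  induction l with
  | nil => intro i; exact ⟨Or.inl rfl, pvLexLe_refl i, by simp⟩
  | cons x t ih =>
      intro i
      simp only [List.foldl_cons]
      set i' := pvStep i (f x) with hi'
      obtain ⟨hmem, hle, hall⟩ := ih i'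
      have hii' : pvLexLe i i' := by
        rw [hi']; unfold pvStep; split <;> [skip; exact pvLexLe_refl i]
        · unfold pvLexLe; omega
      have hxi' : pvLexLe (f x) i' := by
        rw [hi']; unfold pvStep; split <;> [exact pvLexLe_refl (f x); skip]
        · unfold pvLexLe at *; omega
      have hi'cases : i' = i ∨ i' = f x := by
        rw [hi']; unfold pvStep; split <;> [exact Or.inr rfl; exact Or.inl rfl]
      refine ⟨?_, pvLexLe_trans hii' hle, ?_⟩
      · rcases hmem with h | ⟨t0, ht0, he⟩
        · rcases hi'cases with h2 | h2
          · exact Or.inl (h.trans h2)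
          · exact Or.inr ⟨x, by simp, h.trans h2⟩
        · exact Or.inr ⟨t0, by simp [ht0], he⟩
      · intro s hs
        rcases List.mem_cons.mp hs with rfl | hs
        · exact pvLexLe_trans hxi' hle
        · exact hall s hs

-- the order maintained by A's sort: earlier elements are lex-≥ on (pluscnt, usertotal)
def pvR (a b : Int × Int × List Int) : Prop := pvLexLe (b.1, b.2.1) (a.1, a.2.1)

theorem pvKeyLe_trans (a b c : Int × Int × List Int) :
    pvKeyLe a b = true → pvKeyLe b c = true → pvKeyLe a c = true := by
  unfold pvKeyLe
  simp only [Bool.or_eq_true, Bool.and_eq_true, decide_eq_true_eq]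
  omega

theorem pvKeyLe_total (a b : Int × Int × List Int) : (pvKeyLe a b || pvKeyLe b a) = true := by
  unfold pvKeyLe
  simp only [Bool.or_eq_true, Bool.and_eq_true, decide_eq_true_eq]
  omega

theorem pvR_of_keyLe {a b : Int × Int × List Int} (h : pvKeyLe a b = true) : pvR a b := by
  unfold pvKeyLe at h
  simp only [Bool.or_eq_true, Bool.and_eq_true, decide_eq_true_eq] at h
  unfold pvR pvLexLe
  omega

theorem pvMergeSort_pairwise (xs : List (Int × Int × List Int)) :
    (xs.mergeSort pvKeyLe).Pairwise pvR :=
  (List.pairwise_mergeSort pvKeyLe_trans pvKeyLe_total xs).imp (fun h => pvR_of_keyLe h)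

-- A computes [F.1, F.2] where F is the running lex-max of pvEval over pvCombos
theorem solution_eq_fold (users : List (List Int)) (emoticons : List Int) :
    solution users emoticons =
      [((pvCombos emoticons.length).foldl
          (fun best tmp => pvStep best (pvEval users emoticons tmp)) (-1, -1)).1,
       ((pvCombos emoticons.length).foldl
          (fun best tmp => pvStep best (pvEval users emoticons tmp)) (-1, -1)).2] := by
  unfold solution
  set n := emoticons.length with hn
  set f := pvEval users emoticons with hf
  set anslist := (pvCombos n).map (fun tmp => let r := f tmp; (r.1, r.2, tmp)) with hans
  have hperm := List.mergeSort_perm anslist pvKeyLe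
  have hne : anslist ≠ [] := by
    rw [hans]; simp [pvCombos_ne_nil n]
  obtain ⟨h, t, hs⟩ : ∃ h t, anslist.mergeSort pvKeyLe = h :: t := by
    rcases hsort : anslist.mergeSort pvKeyLe with _ | ⟨h, t⟩
    · exact absurd ((hsort ▸ hperm).nil_eq.symm) hne
    · exact ⟨h, t, rfl⟩
  have hpw := pvMergeSort_pairwise anslist
  rw [hs] at hpw hperm
  have hheadmem : h ∈ anslist := hperm.mem_iff.mp (by simp)
  have hhead_pair : ∃ t0 ∈ pvCombos n, (h.1, h.2.1) = f t0 := by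
    rw [hans] at hheadmem
    obtain ⟨t0, ht0, he⟩ := List.mem_map.mp hheadmem
    exact ⟨t0, ht0, by rw [← he]⟩
  have hheadmax : ∀ t0 ∈ pvCombos n, pvLexLe (f t0) (h.1, h.2.1) := by
    intro t0 ht0
    have hmem : (let r := f t0; (r.1, r.2, t0)) ∈ anslist := by
      rw [hans]; exact List.mem_map.mpr ⟨t0, ht0, rfl⟩
    have : ((f t0).1, (f t0).2, t0) = h ∨ ((f t0).1, (f t0).2, t0) ∈ t :=
      List.mem_cons.mp (hperm.mem_iff.mpr hmem)
    rcases this with he | hmem'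
    · rw [← he]; exact pvLexLe_refl _
    · exact (List.pairwise_cons.mp hpw).1 _ hmem'
  have hB := pvFoldl_max_spec f (pvCombos n) (-1, -1)
  set best := (pvCombos n).foldl (fun best tmp => pvStep best (f tmp)) (-1, -1) with hbest
  obtain ⟨hbmem, _hble, hball⟩ := hB
  obtain ⟨t0, ht0, hpair⟩ := hhead_pair
  have hbne : best ≠ (-1, -1) := by
    intro habs
    have h1 := hball t0 ht0
    rw [habs, ← hpair] at h1
    have h2 := pvEval_fst_nonneg users emoticons t0
    rw [← hf, ← hpair] at h2
    unfold pvLexLe at h1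
    simp only at h1 h2
    omega
  have hbmem' : ∃ t1 ∈ pvCombos n, best = f t1 := by
    rcases hbmem with he | he
    · exact absurd he hbne
    · exact he
  obtain ⟨t1, ht1, hbt1⟩ := hbmem'
  have h1 : pvLexLe (h.1, h.2.1) best := by rw [hpair]; exact hball t0 ht0
  have h2 : pvLexLe best (h.1, h.2.1) := by rw [hbt1]; exact hheadmax t1 ht1
  have heq : (h.1, h.2.1) = best := pvLexLe_antisymm h1 h2
  simp only [hs]
  rw [show h.1 = best.1 by rw [← heq], show h.2.1 = best.2 by rw [← heq]]

-- ===== B-side characterisation =====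

-- the bucket update performed by one recursion level of go, for the chosen rate r
def pvBump (p r : Int) (s : Int × Int × Int × Int) : Int × Int × Int × Int :=
  if r = 10 then (s.1 + PySem.Int.floordiv (p * 90) 100, s.2.1, s.2.2.1, s.2.2.2)
  else if r = 20 then (s.1, s.2.1 + PySem.Int.floordiv (p * 80) 100, s.2.2.1, s.2.2.2)
  else if r = 30 then (s.1, s.2.1, s.2.2.1 + PySem.Int.floordiv (p * 70) 100, s.2.2.2)
  else (s.1, s.2.1, s.2.2.1, s.2.2.2 + PySem.Int.floordiv (p * 60) 100)

def pvAcc : List (Int × Int) → Int × Int × Int × Int → Int × Int × Int × Int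
  | [], s => s
  | pr :: l, s => pvAcc l (pvBump pr.1 pr.2 s)

-- the leaf computation of go, from the four bucket sums
def pvScore4 (users : List (List Int)) (s : Int × Int × Int × Int) : Int × Int :=
  pvScore users (s.2.2.2 + s.2.2.1 + s.2.1 + s.1) (s.2.2.2 + s.2.2.1 + s.2.1)
    (s.2.2.2 + s.2.2.1) s.2.2.2

theorem pvGo_eq (users : List (List Int)) :
    ∀ (rest : List Int) (s10 s20 s30 s40 : Int) (best : Int × Int),
      pvGo users rest s10 s20 s30 s40 best =
        (pvCombos rest.length).foldl
          (fun b tmp => pvStep b (pvScore4 users (pvAcc (rest.zip tmp) (s10, s20, s30, s40)))) best := by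
  intro rest
  induction rest with
  | nil =>
      intro s10 s20 s30 s40 best
      simp only [pvGo, List.length_nil, pvCombos, List.foldl_cons, List.foldl_nil,
        List.zip_nil_left, pvAcc, pvScore4, pvStep]
  | cons p rest ih =>
      intro s10 s20 s30 s40 best
      simp only [pvGo, List.length_cons, pvCombos, List.flatMap_cons, List.flatMap_nil,
        List.append_nil, List.foldl_append, List.foldl_map, List.zip_cons_cons, pvAcc]
      rw [ih, ih, ih, ih]
      simp only [pvBump]
      norm_num

-- generic: a conditional-accumulating foldl is its initial value plus a sum
theorem pvFoldl_if_sum {α : Type} (q : α → Prop) [DecidablePred q] (f : α → Int) :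
    ∀ (l : List α) (t : Int),
      l.foldl (fun t x => if q x then t + f x else t) t
        = t + (l.map fun x => if q x then f x else 0).sum := by
  intro l
  induction l with
  | nil => intro t; simp
  | cons x xs ih =>
      intro t
      simp only [List.foldl_cons, List.map_cons, List.sum_cons, ih]
      split <;> omega

-- an index map over range equals a map over the zipped lists
theorem pvRange_map_zip (F : Int → Int → Int) :
    ∀ (xs ys : List Int), xs.length = ys.length →
      (List.range ys.length).map (fun j => F (xs.getD j 0) (ys.getD j 0))
        = (xs.zip ys).map (fun pr => F pr.1 pr.2) := by
  intro xs
  induction xs with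
  | nil => intro ys h; simp at h; simp [← h]
  | cons x xs ih =>
      intro ys h
      rcases ys with _ | ⟨y, ys⟩
      · simp at h
      · simp only [List.length_cons, List.range_succ_eq_map, List.map_cons, List.map_map,
          List.zip_cons_cons]
        refine congrArg₂ _ (by simp) ?_
        have := ih ys (by simpa using h)
        simpa [Function.comp] using this

-- the bucket sums accumulated by pvAcc, in closed form
theorem pvAcc_eq :
    ∀ (l : List (Int × Int)) (s : Int × Int × Int × Int),
      pvAcc l s =
        (s.1 + (l.map fun pr => if pr.2 = 10 then PySem.Int.floordiv (pr.1 * 90) 100 else 0).sum,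
         s.2.1 + (l.map fun pr => if pr.2 = 20 then PySem.Int.floordiv (pr.1 * 80) 100 else 0).sum,
         s.2.2.1 + (l.map fun pr => if pr.2 = 30 then PySem.Int.floordiv (pr.1 * 70) 100 else 0).sum,
         s.2.2.2 + (l.map fun pr =>
            if pr.2 = 10 ∨ pr.2 = 20 ∨ pr.2 = 30 then 0
            else PySem.Int.floordiv (pr.1 * 60) 100).sum) := by
  intro l
  induction l with
  | nil => intro s; simp [pvAcc]
  | cons pr l ih =>
      intro s
      rw [pvAcc, ih]
      unfold pvBump
      simp only [List.map_cons, List.sum_cons]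
      split_ifs with h1 h2 h3 <;> norm_num [Prod.ext_iff, *] <;> omega

-- membership in a zip implies membership of the right component
theorem pvMem_zip_right {α β : Type} :
    ∀ {xs : List α} {ys : List β} {pr : α × β}, pr ∈ xs.zip ys → pr.2 ∈ ys := by
  intro xs
  induction xs with
  | nil => intro ys pr h; simp at h
  | cons x xs ih =>
      intro ys pr h
      rcases ys with _ | ⟨y, ys⟩
      · simp at h
      · rcases List.mem_cons.mp h with rfl | h
        · simp
        · exact List.mem_cons_of_mem _ (ih h)

-- a foldl congruence on members
theorem pvFoldl_congr {α β : Type} {f g : β → α → β} :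
    ∀ (l : List α) (b : β), (∀ acc, ∀ x ∈ l, f acc x = g acc x) →
      l.foldl f b = l.foldl g b := by
  intro l
  induction l with
  | nil => intro b _; rfl
  | cons x xs ih =>
      intro b h
      simp only [List.foldl_cons, h b x (List.mem_cons_self ..)]
      exact ih _ (fun acc y hy => h acc y (List.mem_cons_of_mem _ hy))

-- the spend score() picks for threshold a, from the four suffix sums of the buckets
def pvSel (a : Int) (s : Int × Int × Int × Int) : Int :=
  if a ≤ 10 then s.2.2.2 + s.2.2.1 + s.2.1 + s.1
  else if a ≤ 20 then s.2.2.2 + s.2.2.1 + s.2.1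
  else if a ≤ 30 then s.2.2.2 + s.2.2.1
  else if a ≤ 40 then s.2.2.2 else 0

-- that spend equals the per-emoticon conditional sum, when every rate is 10/20/30/40
theorem pvSpend_eq (a : Int) :
    ∀ (l : List (Int × Int)),
      (∀ pr ∈ l, pr.2 = 10 ∨ pr.2 = 20 ∨ pr.2 = 30 ∨ pr.2 = 40) →
      pvSel a (pvAcc l (0, 0, 0, 0))
        = (l.map fun pr =>
            if a ≤ pr.2 then PySem.Int.floordiv (pr.1 * (100 - pr.2)) 100 else 0).sum := by
  intro l
  induction l with
  | nil => intro _; simp [pvSel, pvAcc]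
  | cons pr l ih =>
      intro hr
      have ih' := ih (fun q hq => hr q (List.mem_cons_of_mem _ hq))
      have hhead := hr pr (List.mem_cons_self ..)
      rw [pvAcc_eq] at ih' ⊢
      unfold pvSel at ih' ⊢
      simp only [List.map_cons, List.sum_cons, zero_add] at ih' ⊢
      rcases hhead with h | h | h | h <;>
        simp only [h] <;> norm_num at ih' ⊢ <;> split_ifs at ih' ⊢ <;> omega

-- B's leaf value at a full assignment equals A's per-combination evaluation
theorem pvScore4_eq_eval (users : List (List Int)) (emoticons tmp : List Int)
    (hlen : emoticons.length = tmp.length)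
    (hr : ∀ r ∈ tmp, r = 10 ∨ r = 20 ∨ r = 30 ∨ r = 40) :
    pvScore4 users (pvAcc (emoticons.zip tmp) (0, 0, 0, 0)) = pvEval users emoticons tmp := by
  have hrz : ∀ pr ∈ emoticons.zip tmp, pr.2 = 10 ∨ pr.2 = 20 ∨ pr.2 = 30 ∨ pr.2 = 40 :=
    fun pr hpr => hr pr.2 (pvMem_zip_right hpr)
  unfold pvScore4 pvScore pvEval
  refine pvFoldl_congr _ _ ?_
  intro acc u _
  have htotal :
      (List.range tmp.length).foldl (fun (t : Int) j =>
          if u.getD 0 0 ≤ tmp.getD j 0 then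
            t + ((List.range tmp.length).map (fun i =>
              PySem.Int.floordiv (emoticons.getD i 0 * (100 - tmp.getD i 0)) 100)).getD j 0
          else t) 0
        = pvSel (u.getD 0 0) (pvAcc (emoticons.zip tmp) (0, 0, 0, 0)) := by
    rw [pvSpend_eq (u.getD 0 0) (emoticons.zip tmp) hrz]
    rw [pvFoldl_if_sum (fun j => u.getD 0 0 ≤ tmp.getD j 0) _ (List.range tmp.length) 0]
    rw [zero_add]
    have hmap : (List.range tmp.length).map (fun j =>
          if u.getD 0 0 ≤ tmp.getD j 0 then
            ((List.range tmp.length).map (fun i =>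
              PySem.Int.floordiv (emoticons.getD i 0 * (100 - tmp.getD i 0)) 100)).getD j 0
          else 0)
        = (List.range tmp.length).map (fun j =>
          if u.getD 0 0 ≤ tmp.getD j 0 then
            PySem.Int.floordiv (emoticons.getD j 0 * (100 - tmp.getD j 0)) 100
          else 0) := by
      refine List.map_congr_left ?_
      intro j hj
      have hjlt : j < tmp.length := List.mem_range.mp hj
      have : ((List.range tmp.length).map (fun i =>
          PySem.Int.floordiv (emoticons.getD i 0 * (100 - tmp.getD i 0)) 100)).getD j 0
          = PySem.Int.floordiv (emoticons.getD j 0 * (100 - tmp.getD j 0)) 100 := by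
        rw [List.getD_eq_getElem?_getD]
        simp [hjlt]
      rw [this]
    rw [hmap]
    exact congrArg List.sum
      (pvRange_map_zip (fun p r => if u.getD 0 0 ≤ r then
        PySem.Int.floordiv (p * (100 - r)) 100 else 0) emoticons tmp hlen)
  unfold pvSel at htotal
  simp only at htotal ⊢
  rw [htotal]

-- ===== VERDICT (by name: the statement is the Claim_ definition above) =====
theorem solution_spec : Claim_equal_solution := by
  intro users emoticons _hdom _hpre
  unfold Spec_solution
  rw [solution_eq_fold]
  unfold solution_alt
  rw [pvGo_eq]
  have hcongr : (pvCombos emoticons.length).foldl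
      (fun b tmp => pvStep b (pvScore4 users (pvAcc (emoticons.zip tmp) (0, 0, 0, 0)))) (-1, -1)
      = (pvCombos emoticons.length).foldl
      (fun b tmp => pvStep b (pvEval users emoticons tmp)) (-1, -1) := by
    refine pvFoldl_congr _ _ ?_
    intro b tmp htmp
    rw [pvScore4_eq_eval users emoticons tmp (pvCombos_length htmp).symm (pvCombos_rates htmp)]
  rw [hcongr]
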